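-- pv_equiv track=rewrite | github.com/LeonardoFettucciari/Commonsense-Knowledge-Base-Concept-based | src/utils/prompt_utils.py | get_prompt_requirements
-- ===== SOURCE A (Python) =====
-- def get_prompt_requirements(prompt_types):
--     knowledge = any("knowledge" in s.lower() or "all" in s.lower() for s in prompt_types)
--     fewshot = any("fewshot" in s.lower() or "all" in s.lower() for s in prompt_types)
--     cot = any("cot" in s.lower() or "all" in s.lower() for s in prompt_types)
--
--     return {
--         "knowledge": knowledge,
--         "fewshot": fewshot,
--         "cot": cot
--     }
-- ===== SOURCE B (Python) =====
-- def get_prompt_requirements(prompt_types):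
--     # Build one newline-joined lowercase haystack; since no keyword contains
--     # a newline, a substring hit in the haystack is a hit in some element.
--     haystack = "\n".join(s.lower() for s in prompt_types)
--     has_all = "all" in haystack
--     return {
--         "knowledge": has_all or "knowledge" in haystack,
--         "fewshot": has_all or "fewshot" in haystack,
--         "cot": has_all or "cot" in haystack,
--     }
-- ===== Notes on version B (the rewrite author's own statement) =====
-- stated objective: alternative
-- what changed: Instead of three any() scans testing each element (lowercasing each string up to six times), B lowercases once, joins all strings into a single newline-separated haystack, and answers each flag with one substring test on that haystack (exact because no keyword contains a newline).
import Mathlib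
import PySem

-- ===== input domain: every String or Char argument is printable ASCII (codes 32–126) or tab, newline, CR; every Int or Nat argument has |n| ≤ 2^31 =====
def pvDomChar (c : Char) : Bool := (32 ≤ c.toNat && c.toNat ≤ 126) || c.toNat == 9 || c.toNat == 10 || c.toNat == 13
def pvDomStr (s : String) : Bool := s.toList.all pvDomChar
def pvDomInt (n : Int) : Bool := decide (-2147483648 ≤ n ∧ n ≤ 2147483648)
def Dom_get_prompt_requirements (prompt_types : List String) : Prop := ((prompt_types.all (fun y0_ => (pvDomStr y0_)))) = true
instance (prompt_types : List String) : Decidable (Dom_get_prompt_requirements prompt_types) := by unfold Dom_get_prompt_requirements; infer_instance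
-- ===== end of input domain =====

-- B lowercases each string once, joins everything into one newline-separated haystack and answers
-- each flag with a single substring test on it (exact because no keyword contains a newline);
-- objective: alternative.

-- ===== PORT A =====
def get_prompt_requirements (prompt_types : List String) : List (String × Bool) :=
  let knowledge := prompt_types.any (fun s => PySem.Str.isIn "knowledge" (PySem.Str.lower s) || PySem.Str.isIn "all" (PySem.Str.lower s))
  let fewshot := prompt_types.any (fun s => PySem.Str.isIn "fewshot" (PySem.Str.lower s) || PySem.Str.isIn "all" (PySem.Str.lower s))
  let cot := prompt_types.any (fun s => PySem.Str.isIn "cot" (PySem.Str.lower s) || PySem.Str.isIn "all" (PySem.Str.lower s))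
  [("knowledge", knowledge), ("fewshot", fewshot), ("cot", cot)]

-- ===== PORT B =====
def get_prompt_requirements_alt (prompt_types : List String) : List (String × Bool) :=
  let haystack := PySem.Str.join "\n" (prompt_types.map PySem.Str.lower)
  let hasAll := PySem.Str.isIn "all" haystack
  [("knowledge", hasAll || PySem.Str.isIn "knowledge" haystack),
   ("fewshot", hasAll || PySem.Str.isIn "fewshot" haystack),
   ("cot", hasAll || PySem.Str.isIn "cot" haystack)]

-- ===== PRECONDITION & SPEC =====
def Spec_get_prompt_requirements (prompt_types : List String) (out : List (String × Bool)) : Prop := out = get_prompt_requirements_alt prompt_types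
instance (prompt_types : List String) (out : List (String × Bool)) : Decidable (Spec_get_prompt_requirements prompt_types out) := by unfold Spec_get_prompt_requirements; infer_instance

-- ===== CLAIM (what is proved, stated in full; the proofs are below) =====
def Claim_equal_get_prompt_requirements : Prop := ∀ (prompt_types : List String), Dom_get_prompt_requirements prompt_types → Spec_get_prompt_requirements prompt_types (get_prompt_requirements prompt_types)

-- ===== LEMMAS AND PROOFS =====

-- An infix that avoids the separator element lies wholly on one side of it.
theorem pv_infix_middle {α : Type} (c : α) (kw xs ys : List α) (hc : c ∉ kw) :
    kw <:+: xs ++ c :: ys ↔ kw <:+: xs ∨ kw <:+: ys := by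
  constructor
  · rintro ⟨s, t, h⟩
    rw [List.append_assoc] at h
    rcases List.append_eq_append_iff.mp h with ⟨as, hxs, hkt⟩ | ⟨bs, hs, hcy⟩
    · rcases List.append_eq_append_iff.mp hkt with ⟨ds, has, ht⟩ | ⟨es, hkw, hcy2⟩
      · left; exact ⟨s, ds, by rw [hxs, has, List.append_assoc]⟩
      · cases es with
        | nil => left; rw [List.append_nil] at hkw; exact ⟨s, [], by simp [hxs, hkw]⟩
        | cons e es' =>
          exfalso
          have he : e = c := by
            have := hcy2
            simp only [List.cons_append] at this
            exact (List.cons_eq_cons.mp this).1.symm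
          apply hc
          rw [hkw, he]
          simp
    · cases bs with
      | nil =>
        rw [List.nil_append] at hcy
        cases kw with
        | nil => right; exact ⟨[], ys, by simp⟩
        | cons k kw' =>
          exfalso
          have hk : k = c := by
            simp only [List.cons_append] at hcy
            exact (List.cons_eq_cons.mp hcy).1.symm
          exact hc (hk ▸ List.mem_cons_self ..)
      | cons b bs' =>
        right
        have hys : ys = bs' ++ (kw ++ t) := by
          simp only [List.cons_append] at hcy
          exact (List.cons_eq_cons.mp hcy).2
        exact ⟨bs', t, by rw [hys, List.append_assoc]⟩
  · rintro (h | h)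
    · exact h.trans ⟨[], c :: ys, by simp⟩
    · exact h.trans ⟨xs ++ [c], [], by simp⟩

-- Searching a nonempty newline-free keyword in the newline-join equals searching each part.
theorem pv_isIn_join (kw : List Char) (hne : kw ≠ []) (hc : '\n' ∉ kw) :
    ∀ parts : List (List Char),
      PySem.Chars.isIn kw (PySem.Chars.join ['\n'] parts) = parts.any (fun p => PySem.Chars.isIn kw p)
  | [] => by
      rw [PySem.Chars.join_nil, List.any_nil]
      rw [PySem.Chars.isIn_eq_false_iff]
      intro hinf
      exact hne (List.eq_nil_of_infix_nil hinf)
  | [p] => by rw [PySem.Chars.join_singleton]; simp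
  | p :: q :: rest => by
      rw [PySem.Chars.join_cons_cons]
      have ih := pv_isIn_join kw hne hc (q :: rest)
      rw [Bool.eq_iff_iff]
      rw [PySem.Chars.isIn_iff_infix]
      have : p ++ ['\n'] ++ PySem.Chars.join ['\n'] (q :: rest)
           = p ++ '\n' :: PySem.Chars.join ['\n'] (q :: rest) := by simp
      rw [this, pv_infix_middle '\n' kw p _ hc]
      rw [List.any_cons, Bool.or_eq_true, ← ih]
      rw [PySem.Chars.isIn_iff_infix, PySem.Chars.isIn_iff_infix]

theorem pv_any_or {α : Type} (l : List α) (p q : α → Bool) :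
    l.any (fun x => p x || q x) = (l.any p || l.any q) := by
  induction l with
  | nil => simp
  | cons h t ih => simp only [List.any_cons, ih]; cases p h <;> cases q h <;> simp

-- One keyword: A's per-element disjunct equals B's haystack test.
theorem pv_key (kw : String) (hne : kw.toList ≠ []) (hc : '\n' ∉ kw.toList) (l : List String) :
    PySem.Str.isIn kw (PySem.Str.join "\n" (l.map PySem.Str.lower))
      = l.any (fun s => PySem.Str.isIn kw (PySem.Str.lower s)) := by
  rw [PySem.Str.isIn_eq, PySem.Str.toList_join]
  have hsep : ("\n" : String).toList = ['\n'] := by decide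
  rw [hsep, List.map_map, pv_isIn_join kw.toList hne hc, List.any_map]
  congr 1

-- ===== VERDICT (by name: the statement is the Claim_ definition above) =====
theorem get_prompt_requirements_spec : Claim_equal_get_prompt_requirements := by
  intro l _
  unfold Spec_get_prompt_requirements get_prompt_requirements get_prompt_requirements_alt
  simp only [pv_key "knowledge" (by decide) (by decide) l,
             pv_key "fewshot" (by decide) (by decide) l,
             pv_key "cot" (by decide) (by decide) l,
             pv_key "all" (by decide) (by decide) l,
             pv_any_or]
  simp [Bool.or_comm]
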